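-- pv_equiv track=rewrite | github.com/leila100/coding-exercises | codeSignal/theCore/SpringOfIntegration/pairOfShoes.py | pairOfShoes
-- ===== SOURCE A (Python) =====
-- def pairOfShoes(shoes):
--     pairs = {}
--     for shoe in shoes:
--         foot = shoe[0]
--         size = shoe[1]
--         if size not in pairs:
--             pairs[size] = {0: 0, 1: 0}
--         pairs[size][foot] += 1
--     # check if each size has same number of left and right
--     for size in pairs:
--         if pairs[size][0] != pairs[size][1]:
--             return False
--     return True
-- ===== SOURCE B (Python) =====
-- def pairOfShoes(shoes):
--     # Group the sizes by foot, then compare the two multisets via sorting.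
--     sides = {0: [], 1: []}
--     for shoe in shoes:
--         sides[shoe[0]].append(shoe[1])
--     return sorted(sides[0]) == sorted(sides[1])
-- ===== Notes on version B (the rewrite author's own statement) =====
-- stated objective: simpler
-- what changed: Instead of A's per-size dict of {left,right} counters checked size by size in a second loop, B groups the sizes into two lists keyed by foot and returns one multiset-equality comparison (sorted(sides[0]) == sorted(sides[1])).
import Mathlib
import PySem

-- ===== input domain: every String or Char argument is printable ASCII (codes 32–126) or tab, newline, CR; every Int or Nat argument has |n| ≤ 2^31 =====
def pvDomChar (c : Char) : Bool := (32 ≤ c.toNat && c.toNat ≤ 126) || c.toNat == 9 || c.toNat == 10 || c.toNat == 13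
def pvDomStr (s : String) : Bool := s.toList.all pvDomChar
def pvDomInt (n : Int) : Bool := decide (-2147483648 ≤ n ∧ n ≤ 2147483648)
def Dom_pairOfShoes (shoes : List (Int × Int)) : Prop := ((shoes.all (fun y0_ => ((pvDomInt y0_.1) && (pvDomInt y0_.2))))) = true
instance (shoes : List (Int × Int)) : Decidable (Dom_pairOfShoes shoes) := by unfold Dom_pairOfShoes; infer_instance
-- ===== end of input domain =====

-- B replaces A's per-size dict of left/right counters by one multiset comparison of the
-- two feet's size lists (simpler decomposition; same return value on Pre_).

-- ===== PORT A =====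
-- one iteration of A's first loop: dispatch shoe into pairs[size][foot]
def pairStep (pairs : PySem.Dict Int (PySem.Dict Int Int)) (shoe : Int × Int) :
    PySem.Dict Int (PySem.Dict Int Int) :=
  let foot := shoe.1
  let size := shoe.2
  let pairs := if pairs.contains size then pairs
               else pairs.insert size (PySem.Dict.ofList [(0, 0), (1, 0)])
  -- pairs[size][foot] += 1 (size is always present here; a foot outside {0,1} raises
  -- KeyError in Python — those inputs are excluded by Pre_)
  let inner := pairs.getD size PySem.Dict.empty
  pairs.insert size (inner.insert foot (inner.getD foot 0 + 1))

def pairOfShoes (shoes : List (Int × Int)) : Bool :=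
  let pairs := shoes.foldl pairStep PySem.Dict.empty
  -- second loop with early `return False` = all sizes balanced
  pairs.keys.all (fun size =>
    let inner := pairs.getD size PySem.Dict.empty
    inner.getD 0 0 == inner.getD 1 0)

-- ===== PORT B =====
def pairOfShoes_alt (shoes : List (Int × Int)) : Bool :=
  -- sides[shoe[0]].append(shoe[1]); a foot outside {0,1} raises KeyError in Python — excluded by Pre_
  let sides := shoes.foldl
    (fun (d : PySem.Dict Int (List Int)) shoe => d.modify shoe.1 [] (· ++ [shoe.2]))
    (PySem.Dict.ofList [(0, []), (1, [])])
  PySem.List.sorted (sides.getD 0 []) (fun x => x) false ==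
    PySem.List.sorted (sides.getD 1 []) (fun x => x) false

-- ===== PRECONDITION & SPEC =====
-- Pre_ excludes inputs containing a foot value other than 0/1, on which A raises KeyError.
def Pre_pairOfShoes (shoes : List (Int × Int)) : Prop :=
  ∀ sh ∈ shoes, sh.1 = 0 ∨ sh.1 = 1
instance (shoes : List (Int × Int)) : Decidable (Pre_pairOfShoes shoes) := by
  unfold Pre_pairOfShoes; infer_instance
def pvWitness_pairOfShoes : (List (Int × Int)) := [(0, 5), (1, 5), (1, 7)]

def Spec_pairOfShoes (shoes : List (Int × Int)) (out : Bool) : Prop := out = pairOfShoes_alt shoes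
instance (shoes : List (Int × Int)) (out : Bool) : Decidable (Spec_pairOfShoes shoes out) := by
  unfold Spec_pairOfShoes; infer_instance

-- ===== CLAIM (what is proved, stated in full; the proofs are below) =====
def Claim_equal_pairOfShoes : Prop := ∀ (shoes : List (Int × Int)), Dom_pairOfShoes shoes → Pre_pairOfShoes shoes → Spec_pairOfShoes shoes (pairOfShoes shoes)

-- ===== LEMMAS AND PROOFS =====

-- number of shoes of foot f and size s
def footCount (shoes : List (Int × Int)) (f s : Int) : Nat :=
  shoes.countP (fun sh => sh.1 == f && sh.2 == s)

lemma footCount_eq_zero (l : List (Int × Int)) (f s : Int) (hs : s ∉ l.map Prod.snd) :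
    footCount l f s = 0 := by
  apply List.countP_eq_zero.2
  intro sh hsh hcond
  simp only [Bool.and_eq_true, beq_iff_eq] at hcond
  exact hs (List.mem_map.2 ⟨sh, hsh, hcond.2⟩)

-- invariant of A's first loop: keys = sizes seen, inner counters = per-foot counts
lemma loop_inv (shoes : List (Int × Int)) (h : ∀ sh ∈ shoes, sh.1 = 0 ∨ sh.1 = 1) : ∀ s : Int,
    ((shoes.foldl pairStep PySem.Dict.empty).contains s = decide (s ∈ shoes.map Prod.snd)) ∧
    (((shoes.foldl pairStep PySem.Dict.empty).getD s PySem.Dict.empty).getD 0 0 = (footCount shoes 0 s : Int)) ∧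
    (((shoes.foldl pairStep PySem.Dict.empty).getD s PySem.Dict.empty).getD 1 0 = (footCount shoes 1 s : Int)) := by
  induction shoes using List.reverseRecOn with
  | nil => intro s; simp [footCount, PySem.Dict.contains_empty, PySem.Dict.getD_empty]
  | append_singleton l sh ih =>
    intro s
    have hsh := h sh (by simp)
    have hl : ∀ x ∈ l, x.1 = 0 ∨ x.1 = 1 := fun x hx => h x (by simp [hx])
    obtain ⟨hc, h0, h1⟩ := ih hl s
    obtain ⟨hc', h0', h1'⟩ := ih hl sh.2
    rw [List.foldl_append, List.foldl_cons, List.foldl_nil]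
    set d := l.foldl pairStep PySem.Dict.empty with hd
    have hcount : ∀ f : Int, footCount (l ++ [sh]) f s =
        footCount l f s + (if sh.1 == f && sh.2 == s then 1 else 0) := by
      intro f; simp [footCount, List.countP_append]
    have hmemapp : (s ∈ (l ++ [sh]).map Prod.snd) ↔ (s ∈ l.map Prod.snd ∨ s = sh.2) := by
      simp [List.mem_append, eq_comm]
    simp only [pairStep]
    by_cases hmem : d.contains sh.2 = true
    · rw [if_pos hmem]
      refine ⟨?_, ?_, ?_⟩
      · rw [PySem.Dict.contains_insert, hc]
        rw [Bool.eq_iff_iff]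
        simp only [Bool.or_eq_true, decide_eq_true_eq, beq_iff_eq, hmemapp]
        tauto
      · rw [PySem.Dict.getD_insert, hcount]
        by_cases hss : s = sh.2
        · subst hss; rw [if_pos rfl]
          rcases hsh with hf | hf <;> rw [hf, PySem.Dict.getD_insert] <;>
            simp [h0']
        · rw [if_neg hss, h0]
          have : (sh.2 == s) = false := by simp [Ne.symm hss]
          simp [this]
      · rw [PySem.Dict.getD_insert, hcount]
        by_cases hss : s = sh.2
        · subst hss; rw [if_pos rfl]
          rcases hsh with hf | hf <;> rw [hf, PySem.Dict.getD_insert] <;>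
            simp [h1']
        · rw [if_neg hss, h1]
          have : (sh.2 == s) = false := by simp [Ne.symm hss]
          simp [this]
    · rw [if_neg hmem]
      simp only [Bool.not_eq_true] at hmem
      have hsz : sh.2 ∉ l.map Prod.snd := by
        intro hmm; rw [hc'] at hmem; simp [hmm] at hmem
      have hzero0 := footCount_eq_zero l 0 sh.2 hsz
      have hzero1 := footCount_eq_zero l 1 sh.2 hsz
      have hinner : (d.insert sh.2 (PySem.Dict.ofList [(0, 0), (1, 0)])).getD sh.2 PySem.Dict.empty
          = PySem.Dict.ofList [(0, 0), (1, 0)] := PySem.Dict.getD_insert_self _ _ _ _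
      rw [hinner, PySem.Dict.insert_insert_self]
      refine ⟨?_, ?_, ?_⟩
      · rw [PySem.Dict.contains_insert, hc]
        rw [Bool.eq_iff_iff]
        simp only [Bool.or_eq_true, decide_eq_true_eq, beq_iff_eq, hmemapp]
        tauto
      · rw [PySem.Dict.getD_insert, hcount]
        by_cases hss : s = sh.2
        · subst hss; rw [if_pos rfl, hzero0]
          rcases hsh with hf | hf <;> rw [hf] <;> simp <;> decide
        · rw [if_neg hss, h0]
          have : (sh.2 == s) = false := by simp [Ne.symm hss]
          simp [this]
      · rw [PySem.Dict.getD_insert, hcount]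
        by_cases hss : s = sh.2
        · subst hss; rw [if_pos rfl, hzero1]
          rcases hsh with hf | hf <;> rw [hf] <;> simp <;> decide
        · rw [if_neg hss, h1]
          have : (sh.2 == s) = false := by simp [Ne.symm hss]
          simp [this]

lemma portA_iff (shoes : List (Int × Int)) (h : ∀ sh ∈ shoes, sh.1 = 0 ∨ sh.1 = 1) :
    pairOfShoes shoes = true ↔
      ∀ s ∈ shoes.map Prod.snd, footCount shoes 0 s = footCount shoes 1 s := by
  have inv := loop_inv shoes h
  simp only [pairOfShoes, List.all_eq_true]
  constructor
  · intro hall s hs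
    have hk : s ∈ (shoes.foldl pairStep PySem.Dict.empty).keys := by
      rw [← PySem.Dict.contains_iff_mem_keys, (inv s).1]
      simpa using hs
    have hp := hall s hk
    rw [(inv s).2.1, (inv s).2.2, beq_iff_eq] at hp
    exact_mod_cast hp
  · intro hall s hk
    have hs : s ∈ shoes.map Prod.snd := by
      have := (PySem.Dict.contains_iff_mem_keys (d := shoes.foldl pairStep PySem.Dict.empty) (k := s)).2 hk
      rw [(inv s).1] at this
      exact of_decide_eq_true this
    rw [(inv s).2.1, (inv s).2.2, beq_iff_eq]
    exact_mod_cast hall s hs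

lemma count_side (shoes : List (Int × Int)) (f a : Int) :
    ((shoes.filter (fun sh => sh.1 == f)).map (·.2)).count a = footCount shoes f a := by
  simp [List.count_eq_countP, List.countP_map, List.countP_filter, footCount, Function.comp]
  apply List.countP_congr
  intro sh _
  simp [Bool.and_comm]

lemma portB_iff (shoes : List (Int × Int)) :
    pairOfShoes_alt shoes = true ↔ ∀ s : Int, footCount shoes 0 s = footCount shoes 1 s := by
  simp only [pairOfShoes_alt]
  rw [PySem.Dict.getD_foldl_modify_append, PySem.Dict.getD_foldl_modify_append]
  rw [beq_iff_eq, PySem.List.sorted_id_eq_sorted_id_iff_perm]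
  have hinit0 : (PySem.Dict.ofList [((0 : Int), ([] : List Int)), (1, [])]).getD 0 [] = [] := by decide
  have hinit1 : (PySem.Dict.ofList [((0 : Int), ([] : List Int)), (1, [])]).getD 1 [] = [] := by decide
  rw [hinit0, hinit1, List.nil_append, List.nil_append, List.perm_iff_count]
  refine forall_congr' (fun a => ?_)
  rw [count_side, count_side]

-- ===== VERDICT (by name: the statement is the Claim_ definition above) =====
theorem pairOfShoes_spec : Claim_equal_pairOfShoes := by
  intro shoes _ hpre
  unfold Spec_pairOfShoes
  rw [Bool.eq_iff_iff, portA_iff shoes hpre, portB_iff shoes]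
  constructor
  · intro hall s
    by_cases hs : s ∈ shoes.map Prod.snd
    · exact hall s hs
    · rw [footCount_eq_zero shoes 0 s hs, footCount_eq_zero shoes 1 s hs]
  · intro hall s _
    exact hall s
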